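-- pv_equiv track=rewrite | github.com/ogfufu/new-board | app.py | find_wiki_url
-- ===== SOURCE A (Python) =====
-- def find_wiki_url(stock_name, index_dict):
--     """Match stock short name to full company name (exact → partial)."""
--     for full, url in index_dict.items():
--         if stock_name == full:
--             return url
--     for full, url in index_dict.items():
--         if stock_name in full:
--             return url
--     return None
-- ===== SOURCE B (Python) =====
-- def find_wiki_url(stock_name, index_dict):
--     """Match stock short name to full company name (exact -> partial), one pass."""
--     first_partial = None
--     for full, url in index_dict.items():
--         if stock_name == full:
--             return url
--         if first_partial is None and stock_name in full:
--             first_partial = url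
--     return first_partial
-- ===== Notes on version B (the rewrite author's own statement) =====
-- stated objective: alternative
-- what changed: Replaces A's two full scans (exact scan, then partial scan) with a single pass that returns on an exact match and carries the first partial match in an accumulator returned at the end.
import Mathlib
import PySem

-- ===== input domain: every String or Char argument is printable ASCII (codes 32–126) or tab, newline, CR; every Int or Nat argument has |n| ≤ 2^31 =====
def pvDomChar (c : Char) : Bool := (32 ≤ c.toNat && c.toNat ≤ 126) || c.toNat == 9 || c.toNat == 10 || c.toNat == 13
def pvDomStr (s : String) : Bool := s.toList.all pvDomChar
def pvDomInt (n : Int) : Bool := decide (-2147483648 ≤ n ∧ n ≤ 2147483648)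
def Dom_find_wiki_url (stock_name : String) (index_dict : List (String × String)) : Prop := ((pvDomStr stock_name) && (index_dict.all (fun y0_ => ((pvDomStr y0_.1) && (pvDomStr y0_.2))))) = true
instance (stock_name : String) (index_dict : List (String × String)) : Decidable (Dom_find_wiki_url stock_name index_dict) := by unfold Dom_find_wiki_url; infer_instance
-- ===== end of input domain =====

-- B: one pass returning on an exact match and carrying the first partial match in an accumulator,
-- instead of A's two separate scans (exact, then partial); return value only, no speed claim.
-- ===== PORT A =====
-- first loop of A: scan for an exact key match
def pvFindExact (stock_name : String) : List (String × String) → Option String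
  | [] => none
  | (full, url) :: rest =>
    if stock_name == full then some url else pvFindExact stock_name rest

-- second loop of A: scan for a substring (partial) match
def pvFindPartial (stock_name : String) : List (String × String) → Option String
  | [] => none
  | (full, url) :: rest =>
    if PySem.Str.isIn stock_name full then some url else pvFindPartial stock_name rest

def find_wiki_url (stock_name : String) (index_dict : List (String × String)) : Option String :=
  match pvFindExact stock_name index_dict with
  | some url => some url
  | none => pvFindPartial stock_name index_dict

-- ===== PORT B =====
-- single loop of B with the 'first_partial' accumulator
def pvAltLoop (stock_name : String) : List (String × String) → Option String → Option String
  | [], first_partial => first_partial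
  | (full, url) :: rest, first_partial =>
    if stock_name == full then some url
    else pvAltLoop stock_name rest
      (if first_partial.isNone && PySem.Str.isIn stock_name full then some url else first_partial)

def find_wiki_url_alt (stock_name : String) (index_dict : List (String × String)) : Option String :=
  pvAltLoop stock_name index_dict none

-- ===== PRECONDITION & SPEC =====
def Spec_find_wiki_url (stock_name : String) (index_dict : List (String × String)) (out : Option String) : Prop := out = find_wiki_url_alt stock_name index_dict
instance (stock_name : String) (index_dict : List (String × String)) (out : Option String) : Decidable (Spec_find_wiki_url stock_name index_dict out) := by unfold Spec_find_wiki_url; infer_instance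

-- ===== CLAIM (what is proved, stated in full; the proofs are below) =====
def Claim_equal_find_wiki_url : Prop := ∀ (stock_name : String) (index_dict : List (String × String)), Dom_find_wiki_url stock_name index_dict → Spec_find_wiki_url stock_name index_dict (find_wiki_url stock_name index_dict)

-- ===== LEMMAS AND PROOFS =====

lemma pvAltLoop_eq (stock_name : String) (d : List (String × String)) (acc : Option String) :
    pvAltLoop stock_name d acc =
      (pvFindExact stock_name d).or (acc.or (pvFindPartial stock_name d)) := by
  induction d generalizing acc with
  | nil => cases acc <;> simp [pvAltLoop, pvFindExact, pvFindPartial]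
  | cons p rest ih =>
    obtain ⟨full, url⟩ := p
    by_cases h : stock_name == full
    · simp [pvAltLoop, pvFindExact, h]
    · simp only [pvAltLoop, pvFindExact, h, ih]
      cases acc <;>
        by_cases hin : PySem.Chars.isIn stock_name.toList full.toList <;>
        simp [pvFindPartial, PySem.Str.isIn, hin]

-- ===== VERDICT (by name: the statement is the Claim_ definition above) =====
theorem find_wiki_url_spec : Claim_equal_find_wiki_url := by
  intro stock_name index_dict _
  show _ = _
  rw [find_wiki_url_alt, pvAltLoop_eq, Option.none_or, find_wiki_url]
  cases pvFindExact stock_name index_dict <;> simp
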